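-- pv_equiv track=rewrite | github.com/Teknowledge/Curriculum | Week 5 Data Representation/Data Representation Lab/Programming Files/Braille Reader/brailleReaderSampleSolution.py | wordToNumber
-- ===== SOURCE A (Python) =====
-- def wordToNumber(word):
--     letters = ["t", "y", "g", "h", "v", "b"]
--     num = 0
--     for letter in letters:
--         num = num << 1
--         if letter in word:
--             num += 1
--     return num
-- ===== SOURCE B (Python) =====
-- def wordToNumber(word):
--     table = {'t': 32, 'y': 16, 'g': 8, 'h': 4, 'v': 2, 'b': 1}
--     num = 0
--     for ch in word:
--         if ch in table:
--             num |= table[ch]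
--     return num
-- ===== Notes on version B (the rewrite author's own statement) =====
-- stated objective: idiomatic
-- what changed: B scans the input word once against a letter-to-bit lookup table and ORs bits in (duplicate-safe), instead of A's pass over the fixed letter list doing a substring test on the word at each shift.
import Mathlib
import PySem

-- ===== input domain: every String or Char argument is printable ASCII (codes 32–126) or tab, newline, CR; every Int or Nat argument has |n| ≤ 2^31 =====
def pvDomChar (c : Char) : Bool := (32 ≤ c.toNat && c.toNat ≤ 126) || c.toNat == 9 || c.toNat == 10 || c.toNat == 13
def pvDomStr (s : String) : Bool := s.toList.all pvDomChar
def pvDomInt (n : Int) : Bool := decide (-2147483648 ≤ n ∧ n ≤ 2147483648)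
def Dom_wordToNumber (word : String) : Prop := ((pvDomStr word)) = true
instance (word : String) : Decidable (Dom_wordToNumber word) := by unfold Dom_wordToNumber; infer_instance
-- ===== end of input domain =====

-- B scans the word once against a letter→bit lookup table and ORs bits in, instead of A's
-- pass over the fixed letter list with a substring test of the word per shift (idiomatic rewrite).

-- ===== PORT A =====
def aStep (word : String) (num : Int) (letter : String) : Int :=
  let num' := num <<< 1
  if PySem.Str.isIn letter word then num' + 1 else num'

def wordToNumber (word : String) : Int :=
  ["t", "y", "g", "h", "v", "b"].foldl (aStep word) 0

-- ===== PORT B =====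
def bTable : PySem.Dict Char Int :=
  PySem.Dict.ofList [('t', 32), ('y', 16), ('g', 8), ('h', 4), ('v', 2), ('b', 1)]

def bStep (num : Int) (ch : Char) : Int :=
  match PySem.Dict.get? bTable ch with
  | some v => PySem.Int.bor num v
  | none => num

def wordToNumber_alt (word : String) : Int :=
  word.toList.foldl bStep 0

-- ===== PRECONDITION & SPEC =====
def Spec_wordToNumber (word : String) (out : Int) : Prop := out = wordToNumber_alt word
instance (word : String) (out : Int) : Decidable (Spec_wordToNumber word out) := by unfold Spec_wordToNumber; infer_instance

-- ===== CLAIM (what is proved, stated in full; the proofs are below) =====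
def Claim_equal_wordToNumber : Prop := ∀ (word : String), Dom_wordToNumber word → Spec_wordToNumber word (wordToNumber word)

-- ===== LEMMAS AND PROOFS =====

/-- The six-bit value determined by which of the six letters are present. -/
def mask (t y g h v b : Bool) : Int :=
  (if t then 32 else 0) + (if y then 16 else 0) + (if g then 8 else 0) +
  (if h then 4 else 0) + (if v then 2 else 0) + (if b then 1 else 0)

lemma isIn_singleton (c : Char) (l : List Char) :
    PySem.Chars.isIn [c] l = l.contains c := by
  by_cases h : c ∈ l
  · have hin : ([c] : List Char) <:+: l := by
      obtain ⟨p, q, rfl⟩ := List.append_of_mem h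
      exact ⟨p, q, by simp⟩
    have htrue : PySem.Chars.isIn [c] l = true := by
      rw [PySem.Chars.isIn_iff_infix]; exact hin
    simp [htrue, h]
  · have hfalse : PySem.Chars.isIn [c] l = false := by
      rw [PySem.Chars.isIn_eq_false_iff]
      exact fun hin => h (hin.mem (by simp))
    simp [hfalse, h]

lemma A_mask (word : String) :
    wordToNumber word =
      mask (word.toList.contains 't') (word.toList.contains 'y') (word.toList.contains 'g')
        (word.toList.contains 'h') (word.toList.contains 'v') (word.toList.contains 'b') := by
  have ht : ("t" : String).toList = ['t'] := by decide
  have hy : ("y" : String).toList = ['y'] := by decide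
  have hg : ("g" : String).toList = ['g'] := by decide
  have hh : ("h" : String).toList = ['h'] := by decide
  have hv : ("v" : String).toList = ['v'] := by decide
  have hb : ("b" : String).toList = ['b'] := by decide
  simp only [wordToNumber, List.foldl, aStep, PySem.Str.isIn_eq,
    ht, hy, hg, hh, hv, hb, isIn_singleton]
  generalize word.toList.contains 't' = x1
  generalize word.toList.contains 'y' = x2
  generalize word.toList.contains 'g' = x3
  generalize word.toList.contains 'h' = x4
  generalize word.toList.contains 'v' = x5
  generalize word.toList.contains 'b' = x6
  revert x1 x2 x3 x4 x5 x6
  decide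

lemma bStep_mask (t y g h v b : Bool) (c : Char) :
    bStep (mask t y g h v b) c =
      mask (t || (c == 't')) (y || (c == 'y')) (g || (c == 'g'))
        (h || (c == 'h')) (v || (c == 'v')) (b || (c == 'b')) := by
  by_cases h1 : c = 't'
  · subst h1; revert t y g h v b; decide
  by_cases h2 : c = 'y'
  · subst h2; revert t y g h v b; decide
  by_cases h3 : c = 'g'
  · subst h3; revert t y g h v b; decide
  by_cases h4 : c = 'h'
  · subst h4; revert t y g h v b; decide
  by_cases h5 : c = 'v'
  · subst h5; revert t y g h v b; decide
  by_cases h6 : c = 'b'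
  · subst h6; revert t y g h v b; decide
  · have e1 : (c == 't') = false := beq_eq_false_iff_ne.mpr h1
    have e2 : (c == 'y') = false := beq_eq_false_iff_ne.mpr h2
    have e3 : (c == 'g') = false := beq_eq_false_iff_ne.mpr h3
    have e4 : (c == 'h') = false := beq_eq_false_iff_ne.mpr h4
    have e5 : (c == 'v') = false := beq_eq_false_iff_ne.mpr h5
    have e6 : (c == 'b') = false := beq_eq_false_iff_ne.mpr h6
    have hnone : PySem.Dict.get? bTable c = none := by
      have hbt : bTable = PySem.Dict.mk [('t', 32), ('y', 16), ('g', 8), ('h', 4), ('v', 2), ('b', 1)] := by decide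
      rw [hbt]
      simp [PySem.Dict.get?, Ne.symm h1, Ne.symm h2,
        Ne.symm h3, Ne.symm h4, Ne.symm h5, Ne.symm h6]
    simp [bStep, hnone, e1, e2, e3, e4, e5, e6]

lemma or_contains (x : Bool) (c d : Char) (cs : List Char) :
    (x || (c == d) || cs.contains d) = (x || (c :: cs).contains d) := by
  by_cases h : c = d
  · subst h; simp
  · cases x <;> simp [h, Ne.symm h]

lemma B_go (cs : List Char) (t y g h v b : Bool) :
    cs.foldl bStep (mask t y g h v b) =
      mask (t || cs.contains 't') (y || cs.contains 'y') (g || cs.contains 'g')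
        (h || cs.contains 'h') (v || cs.contains 'v') (b || cs.contains 'b') := by
  induction cs generalizing t y g h v b with
  | nil => simp
  | cons c cs ih =>
    rw [List.foldl_cons, bStep_mask, ih]
    simp only [or_contains]

lemma B_mask (word : String) :
    wordToNumber_alt word =
      mask (word.toList.contains 't') (word.toList.contains 'y') (word.toList.contains 'g')
        (word.toList.contains 'h') (word.toList.contains 'v') (word.toList.contains 'b') := by
  have h0 : (0 : Int) = mask false false false false false false := by decide
  rw [wordToNumber_alt, h0, B_go]
  simp

-- ===== VERDICT (by name: the statement is the Claim_ definition above) =====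
theorem wordToNumber_spec : Claim_equal_wordToNumber := by
  intro word _
  show wordToNumber word = wordToNumber_alt word
  rw [A_mask, B_mask]
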